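-- pv_equiv track=rewrite | github.com/vesarekola9-ctrl/tamacore-bot | tools/atlas_pack.py | shelf_pack
-- ===== SOURCE A (Python) =====
-- PADDING = 4
--
-- def shelf_pack(sizes, max_w):
--     x = PADDING
--     y = PADDING
--     shelf_h = 0
--
--     placements = []
--     used_w = 0
--     used_h = 0
--
--     for (w, h) in sizes:
--         if x + w + PADDING > max_w:
--             x = PADDING
--             y += shelf_h + PADDING
--             shelf_h = 0
--
--         placements.append((x, y))
--         x += w + PADDING
--         shelf_h = max(shelf_h, h)
--
--         used_w = max(used_w, x)
--         used_h = max(used_h, y + shelf_h + PADDING)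
--
--     atlas_w = min(max_w, max(256, ((used_w + 31) // 32) * 32))
--     atlas_h = max(256, ((used_h + 31) // 32) * 32)
--     return placements, atlas_w, atlas_h
-- ===== SOURCE B (Python) =====
-- PADDING = 4
--
-- def shelf_pack(sizes, max_w):
--     # pass 1: partition items into shelves (rows)
--     shelves = []
--     cur = []
--     x = PADDING
--     for (w, h) in sizes:
--         if x + w + PADDING > max_w:
--             shelves.append(cur)
--             cur = []
--             x = PADDING
--         cur.append((w, h))
--         x += w + PADDING
--     shelves.append(cur)
--
--     # pass 2: assign coordinates shelf by shelf
--     placements = []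
--     y = PADDING
--     used_w = 0
--     used_h = 0
--     for shelf in shelves:
--         x = PADDING
--         hmax = 0
--         for (w, h) in shelf:
--             placements.append((x, y))
--             x += w + PADDING
--             hmax = max(hmax, h)
--             used_w = max(used_w, x)
--         if shelf:
--             used_h = max(used_h, y + hmax + PADDING)
--         y += hmax + PADDING
--
--     atlas_w = min(max_w, max(256, ((used_w + 31) // 32) * 32))
--     atlas_h = max(256, ((used_h + 31) // 32) * 32)
--     return placements, atlas_w, atlas_h
-- ===== Notes on version B (the rewrite author's own statement) =====
-- stated objective: alternative
-- what changed: Replaced the single stateful loop by a two-pass decomposition: pass 1 partitions the items into shelves (rows), pass 2 walks the shelves assigning coordinates and accumulating used width/height per shelf, with the same rounding tail.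
import Mathlib
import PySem

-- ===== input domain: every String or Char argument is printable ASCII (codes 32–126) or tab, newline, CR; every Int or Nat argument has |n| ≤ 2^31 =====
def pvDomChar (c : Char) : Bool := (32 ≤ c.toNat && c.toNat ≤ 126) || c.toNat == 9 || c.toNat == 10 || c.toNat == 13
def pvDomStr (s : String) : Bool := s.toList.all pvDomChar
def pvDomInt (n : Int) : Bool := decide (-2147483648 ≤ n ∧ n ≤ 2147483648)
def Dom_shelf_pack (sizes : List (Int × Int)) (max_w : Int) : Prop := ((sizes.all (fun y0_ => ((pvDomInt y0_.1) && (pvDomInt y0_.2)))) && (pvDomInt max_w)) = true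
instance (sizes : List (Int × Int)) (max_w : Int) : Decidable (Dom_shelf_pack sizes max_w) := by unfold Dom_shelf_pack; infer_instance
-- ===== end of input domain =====

-- B replaces A's single stateful packing loop by a two-pass shelf decomposition
-- (partition into rows, then assign coordinates row by row); alternative, same cost.


-- ===== PORT A =====
-- one step of A's for-loop; state = (x, y, shelf_h, placements, used_w, used_h)
def stepA (max_w : Int) (st : Int × Int × Int × List (Int × Int) × Int × Int)
    (wh : Int × Int) : Int × Int × Int × List (Int × Int) × Int × Int :=
  let (x, y, shelf_h, placements, used_w, used_h) := st
  let (w, h) := wh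
  let (x, y, shelf_h) :=
    if x + w + 4 > max_w then ((4 : Int), y + shelf_h + 4, (0 : Int)) else (x, y, shelf_h)
  let placements := placements ++ [(x, y)]
  let x := x + w + 4
  let shelf_h := max shelf_h h
  let used_w := max used_w x
  let used_h := max used_h (y + shelf_h + 4)
  (x, y, shelf_h, placements, used_w, used_h)

def shelf_pack (sizes : List (Int × Int)) (max_w : Int) : (List (Int × Int)) × Int × Int :=
  let s := sizes.foldl (stepA max_w) (4, 4, 0, [], 0, 0)
  let placements := s.2.2.2.1
  let used_w := s.2.2.2.2.1
  let used_h := s.2.2.2.2.2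
  (placements,
   min max_w (max 256 (PySem.Int.floordiv (used_w + 31) 32 * 32)),
   max 256 (PySem.Int.floordiv (used_h + 31) 32 * 32))

-- ===== PORT B =====
-- pass-1 step: state = (shelves, cur, x)
def stepP1 (max_w : Int) (st : List (List (Int × Int)) × List (Int × Int) × Int)
    (wh : Int × Int) : List (List (Int × Int)) × List (Int × Int) × Int :=
  let (shelves, cur, x) := st
  let (w, _h) := wh
  let (shelves, cur, x) :=
    if x + w + 4 > max_w then (shelves ++ [cur], ([] : List (Int × Int)), (4 : Int))
    else (shelves, cur, x)
  (shelves, cur ++ [wh], x + w + 4)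

-- inner loop of pass 2 (one shelf at row y); state = (placements, x, hmax, used_w)
def stepIn (y : Int) (st : List (Int × Int) × Int × Int × Int)
    (wh : Int × Int) : List (Int × Int) × Int × Int × Int :=
  let (placements, x, hmax, used_w) := st
  let (w, h) := wh
  (placements ++ [(x, y)], x + w + 4, max hmax h, max used_w (x + w + 4))

-- pass-2 step: state = (placements, y, used_w, used_h)
def stepP2 (st : List (Int × Int) × Int × Int × Int)
    (shelf : List (Int × Int)) : List (Int × Int) × Int × Int × Int :=
  let (placements, y, used_w, used_h) := st
  let I := shelf.foldl (stepIn y) (placements, 4, 0, used_w)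
  let used_h := if shelf ≠ [] then max used_h (y + I.2.2.1 + 4) else used_h
  (I.1, y + I.2.2.1 + 4, I.2.2.2, used_h)

def shelf_pack_alt (sizes : List (Int × Int)) (max_w : Int) : (List (Int × Int)) × Int × Int :=
  let p1 := sizes.foldl (stepP1 max_w) ([], [], 4)
  let shelves := p1.1 ++ [p1.2.1]
  let s2 := shelves.foldl stepP2 ([], 4, 0, 0)
  let placements := s2.1
  let used_w := s2.2.2.1
  let used_h := s2.2.2.2
  (placements,
   min max_w (max 256 (PySem.Int.floordiv (used_w + 31) 32 * 32)),
   max 256 (PySem.Int.floordiv (used_h + 31) 32 * 32))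

-- ===== PRECONDITION & SPEC =====
def Spec_shelf_pack (sizes : List (Int × Int)) (max_w : Int) (out : (List (Int × Int)) × Int × Int) : Prop := out = shelf_pack_alt sizes max_w
instance (sizes : List (Int × Int)) (max_w : Int) (out : (List (Int × Int)) × Int × Int) : Decidable (Spec_shelf_pack sizes max_w out) := by unfold Spec_shelf_pack; infer_instance

-- ===== CLAIM (what is proved, stated in full; the proofs are below) =====
def Claim_equal_shelf_pack : Prop := ∀ (sizes : List (Int × Int)) (max_w : Int), Dom_shelf_pack sizes max_w → Spec_shelf_pack sizes max_w (shelf_pack sizes max_w)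

-- ===== LEMMAS AND PROOFS =====

-- pass-1 accumulator-append lemma
lemma p1_append (max_w : Int) (sizes : List (Int × Int))
    (acc : List (List (Int × Int))) (cur : List (Int × Int)) (x : Int) :
    sizes.foldl (stepP1 max_w) (acc, cur, x)
      = ((acc ++ (sizes.foldl (stepP1 max_w) ([], cur, x)).1,
          (sizes.foldl (stepP1 max_w) ([], cur, x)).2.1,
          (sizes.foldl (stepP1 max_w) ([], cur, x)).2.2)) := by
  induction sizes generalizing acc cur x with
  | nil => simp
  | cons wh rest ih =>
    obtain ⟨w, h⟩ := wh
    by_cases hc : x + w + 4 > max_w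
    · rw [List.foldl_cons, List.foldl_cons,
        show stepP1 max_w (acc, cur, x) (w, h) = (acc ++ [cur], [(w, h)], 4 + w + 4) by
          simp [stepP1, hc],
        show stepP1 max_w (([] : List (List (Int × Int))), cur, x) (w, h)
            = ([cur], [(w, h)], 4 + w + 4) by simp [stepP1, hc],
        ih (acc ++ [cur]) [(w, h)] (4 + w + 4), ih [cur] [(w, h)] (4 + w + 4)]
      simp
    · rw [List.foldl_cons, List.foldl_cons,
        show stepP1 max_w (acc, cur, x) (w, h) = (acc, cur ++ [(w, h)], x + w + 4) by
          simp [stepP1, hc],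
        show stepP1 max_w (([] : List (List (Int × Int))), cur, x) (w, h)
            = ([], cur ++ [(w, h)], x + w + 4) by simp [stepP1, hc],
        ih acc (cur ++ [(w, h)]) (x + w + 4)]

-- the main invariant: A's loop continued from a mid-shelf state equals
-- finishing pass 1 on the remaining sizes and running pass 2 on the resulting shelves.
lemma main_inv (max_w : Int) (sizes : List (Int × Int)) :
    ∀ (shelf : List (Int × Int)) (y : Int) (pl : List (Int × Int)) (uw uh : Int),
    (let I := shelf.foldl (stepIn y) (pl, 4, 0, uw)
     let uh' := if shelf ≠ [] then max uh (y + I.2.2.1 + 4) else uh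
     let r := sizes.foldl (stepA max_w) (I.2.1, y, I.2.2.1, I.1, I.2.2.2, uh')
     let p1 := sizes.foldl (stepP1 max_w) ([], shelf, I.2.1)
     let s2 := (p1.1 ++ [p1.2.1]).foldl stepP2 (pl, y, uw, uh)
     r.2.2.2 = (s2.1, s2.2.2.1, s2.2.2.2)) := by
  induction sizes with
  | nil =>
    intro shelf y pl uw uh
    simp only [List.foldl_nil, List.nil_append, List.foldl_cons, stepP2]
  | cons wh rest ih =>
    intro shelf y pl uw uh
    obtain ⟨w, h⟩ := wh
    simp only []
    set I := shelf.foldl (stepIn y) (pl, 4, 0, uw) with hI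
    have hP2 : stepP2 (pl, y, uw, uh) shelf
        = (I.1, y + I.2.2.1 + 4, I.2.2.2,
           if shelf ≠ [] then max uh (y + I.2.2.1 + 4) else uh) := by
      simp [stepP2, ← hI]
    by_cases hc : I.2.1 + w + 4 > max_w
    · -- overflow: close the shelf, open a new one containing (w,h)
      rw [List.foldl_cons, List.foldl_cons,
        show stepA max_w (I.2.1, y, I.2.2.1, I.1, I.2.2.2,
              if shelf ≠ [] then max uh (y + I.2.2.1 + 4) else uh) (w, h)
            = (4 + w + 4, y + I.2.2.1 + 4, max 0 h, I.1 ++ [(4, y + I.2.2.1 + 4)],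
               max I.2.2.2 (4 + w + 4),
               max (if shelf ≠ [] then max uh (y + I.2.2.1 + 4) else uh)
                   (y + I.2.2.1 + 4 + max 0 h + 4)) by simp [stepA, hc],
        show stepP1 max_w ([], shelf, I.2.1) (w, h) = ([shelf], [(w, h)], 4 + w + 4) by
          simp [stepP1, hc],
        p1_append max_w rest [shelf] [(w, h)] (4 + w + 4)]
      have := ih [(w, h)] (y + I.2.2.1 + 4) I.1 I.2.2.2
          (if shelf ≠ [] then max uh (y + I.2.2.1 + 4) else uh)
      simp only [stepIn, List.foldl_cons, List.foldl_nil, ne_eq, reduceCtorEq,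
        not_false_eq_true, if_true, List.cons_append, List.nil_append] at this ⊢
      rw [hP2]
      exact this
    · -- no overflow: (w,h) joins the current shelf
      rw [List.foldl_cons, List.foldl_cons,
        show stepA max_w (I.2.1, y, I.2.2.1, I.1, I.2.2.2,
              if shelf ≠ [] then max uh (y + I.2.2.1 + 4) else uh) (w, h)
            = (I.2.1 + w + 4, y, max I.2.2.1 h, I.1 ++ [(I.2.1, y)],
               max I.2.2.2 (I.2.1 + w + 4),
               max (if shelf ≠ [] then max uh (y + I.2.2.1 + 4) else uh)
                   (y + max I.2.2.1 h + 4)) by simp [stepA, hc],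
        show stepP1 max_w ([], shelf, I.2.1) (w, h)
            = ([], shelf ++ [(w, h)], I.2.1 + w + 4) by simp [stepP1, hc]]
      have huh : max (if shelf ≠ [] then max uh (y + I.2.2.1 + 4) else uh)
            (y + max I.2.2.1 h + 4) = max uh (y + max I.2.2.1 h + 4) := by
        split_ifs <;> omega
      rw [huh]
      have := ih (shelf ++ [(w, h)]) y pl uw uh
      have hI' : (shelf ++ [(w, h)]).foldl (stepIn y) (pl, 4, 0, uw)
          = (I.1 ++ [(I.2.1, y)], I.2.1 + w + 4, max I.2.2.1 h,
             max I.2.2.2 (I.2.1 + w + 4)) := by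
        rw [List.foldl_append, ← hI]
        simp [stepIn]
      rw [hI'] at this
      simp only [ne_eq, List.append_eq_nil_iff, List.cons_ne_self, and_false,
        not_false_eq_true, if_true] at this
      exact this

-- ===== VERDICT (by name: the statement is the Claim_ definition above) =====
theorem shelf_pack_spec : Claim_equal_shelf_pack := by
  intro sizes max_w _
  unfold Spec_shelf_pack
  have h := main_inv max_w sizes [] 4 [] 0 0
  simp only [List.foldl_nil, ne_eq, not_true_eq_false, if_false] at h
  simp only [shelf_pack, shelf_pack_alt]
  rw [h]
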